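-- pv_equiv track=rewrite | github.com/danieleschmidt/protein-diffusion-design-lab | src/protein_diffusion/nextgen_benchmarking_framework.py | _detect_temporal_symmetries
-- ===== SOURCE A (Python) =====
-- from typing import Dict, List, Any, Optional, Callable, Union, Tuple, Set
--
-- def _detect_temporal_symmetries(proteins: List[Dict[str, Any]]) -> List[str]:
--     """Detect temporal symmetries in protein generation."""
--     symmetries = []
--
--     if len(proteins) >= 5:
--         sequences = [p.get("sequence", "") for p in proteins]
--
--         # Check for palindromic order
--         if sequences == sequences[::-1]:
--             symmetries.append("palindromic_order")
--
--         # Check for periodic patterns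
--         for period in range(2, len(sequences) // 2):
--             is_periodic = True
--             for i in range(period, len(sequences)):
--                 if sequences[i] != sequences[i % period]:
--                     is_periodic = False
--                     break
--
--             if is_periodic:
--                 symmetries.append(f"periodic_{period}")
--
--     return symmetries
-- ===== SOURCE B (Python) =====
-- def _detect_temporal_symmetries(proteins):
--     """Detect temporal symmetries in protein generation."""
--     n = len(proteins)
--     if n < 5:
--         return []
--     seqs = [p.get("sequence", "") for p in proteins]
--     out = ["palindromic_order"] if seqs == seqs[::-1] else []
--     # KMP prefix function: pi[i] = length of the longest proper border of seqs[:i+1]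
--     pi = [0] * n
--     k = 0
--     for i in range(1, n):
--         while k > 0 and seqs[i] != seqs[k]:
--             k = pi[k - 1]
--         if seqs[i] == seqs[k]:
--             k += 1
--         pi[i] = k
--     # k is a period of seqs iff n-k is a border length; the failure chain from
--     # pi[n-1] enumerates every border length in decreasing order, i.e. every
--     # period in increasing order
--     b = pi[n - 1]
--     while b > 0:
--         p = n - b
--         if 2 <= p < n // 2:
--             out.append("periodic_%d" % p)
--         b = pi[b - 1]
--     return out
-- ===== Notes on version B (the rewrite author's own statement) =====
-- stated objective: alternative
-- what changed: B finds all periods at once with the KMP prefix (failure) function: every border length of the sequence list is enumerated by the failure chain, and k is a period iff n-k is a border, so A's per-period modulo scan disappears (O(n) worst case vs A's O(n^2) worst case; not measurably faster on the generated inputs, where A's inner loop breaks early).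
import Mathlib
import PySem

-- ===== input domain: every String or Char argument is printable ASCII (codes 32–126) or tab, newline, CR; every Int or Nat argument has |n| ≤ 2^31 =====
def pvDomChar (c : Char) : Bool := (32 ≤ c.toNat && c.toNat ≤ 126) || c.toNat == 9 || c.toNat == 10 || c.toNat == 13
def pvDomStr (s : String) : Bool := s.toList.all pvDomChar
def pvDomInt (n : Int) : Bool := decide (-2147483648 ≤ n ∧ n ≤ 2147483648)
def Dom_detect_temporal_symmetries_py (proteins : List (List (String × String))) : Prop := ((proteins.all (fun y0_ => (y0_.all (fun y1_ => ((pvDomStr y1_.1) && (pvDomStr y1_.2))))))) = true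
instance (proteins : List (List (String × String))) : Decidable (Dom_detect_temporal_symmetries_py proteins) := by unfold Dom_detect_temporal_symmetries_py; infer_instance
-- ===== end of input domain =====

-- B computes all periods via the KMP prefix-function border chain (k is a period iff n-k is a
-- border), replacing A's per-period modulo scan (objective: alternative algorithm).


-- ===== PORT A =====
def detect_temporal_symmetries_py (proteins : List (List (String × String))) : List String :=
  let symmetries : List String := []
  if proteins.length ≥ 5 then
    let sequences := proteins.map (fun p => (PySem.Dict.mk p).getD "sequence" "")
    -- sequences == sequences[::-1]; step -1 never raises, getD [] is never taken
    let symmetries :=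
      if sequences == (PySem.List.slice? sequences none none (-1)).getD [] then
        symmetries ++ ["palindromic_order"]
      else symmetries
    (PySem.List.pyRange 2 (PySem.Int.floordiv (sequences.length : Int) 2) 1).foldl
      (fun acc period =>
        -- inner loop with break: the flag stays false once set, so a && fold is exact
        let is_periodic := (PySem.List.pyRange period (sequences.length : Int) 1).foldl
          (fun ok i => ok && (PySem.List.pyGetD sequences i "" ==
                              PySem.List.pyGetD sequences (PySem.Int.mod i period) "")) true
        if is_periodic then acc ++ ["periodic_" ++ PySem.Int.toStr period] else acc)
      symmetries
  else symmetries

-- ===== PORT B =====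
-- the `while k > 0 and seqs[i] != seqs[k]: k = pi[k-1]` loop; fuel = k bounds its
-- iteration count (k strictly decreases), a pure totality guard
def kmpShrink (seqs : List String) (pi : List Nat) (x : String) : Nat → Nat → Nat
  | 0, k => k
  | fuel+1, k =>
    if 0 < k ∧ ¬ (x = seqs.getD k "") then kmpShrink seqs pi x fuel (pi.getD (k-1) 0)
    else k

-- the `for i in range(1, n)` loop building pi (pi[i] = k appends in index order)
def kmpPi (seqs : List String) : List Nat :=
  ((List.range' 1 (seqs.length - 1)).foldl
    (fun (st : List Nat × Nat) i =>
      let x := seqs.getD i ""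
      let k := kmpShrink seqs st.1 x st.2 st.2
      let k := if x = seqs.getD k "" then k + 1 else k
      (st.1 ++ [k], k))
    ([0], 0)).1

-- the `while b > 0` failure-chain walk; fuel = n bounds it (b strictly decreases)
def chainWalk (pi : List Nat) (n : Nat) : Nat → Nat → List String → List String
  | 0, _, out => out
  | fuel+1, b, out =>
    if 0 < b then
      let p := n - b
      let out2 := if 2 ≤ p ∧ p < n / 2 then out ++ ["periodic_" ++ PySem.Int.toStr (p : Int)] else out
      chainWalk pi n fuel (pi.getD (b-1) 0) out2
    else out

def detect_temporal_symmetries_py_alt (proteins : List (List (String × String))) : List String :=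
  let n := proteins.length
  if n < 5 then []
  else
    let seqs := proteins.map (fun p => (PySem.Dict.mk p).getD "sequence" "")
    let out := if seqs == (PySem.List.slice? seqs none none (-1)).getD [] then ["palindromic_order"] else []
    let pi := kmpPi seqs
    chainWalk pi n n (pi.getD (n-1) 0) out

-- ===== PRECONDITION & SPEC =====
def Spec_detect_temporal_symmetries_py (proteins : List (List (String × String))) (out : List String) : Prop := out = detect_temporal_symmetries_py_alt proteins
instance (proteins : List (List (String × String))) (out : List String) : Decidable (Spec_detect_temporal_symmetries_py proteins out) := by unfold Spec_detect_temporal_symmetries_py; infer_instance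

-- ===== CLAIM (what is proved, stated in full; the proofs are below) =====
def Claim_equal_detect_temporal_symmetries_py : Prop := ∀ (proteins : List (List (String × String))), Dom_detect_temporal_symmetries_py proteins → Spec_detect_temporal_symmetries_py proteins (detect_temporal_symmetries_py proteins)

-- ===== LEMMAS AND PROOFS =====

-- j is a proper border length of s: the prefix of length j is also a suffix
def Border (s : List String) (j : Nat) : Prop :=
  j < s.length ∧ s.take j = s.drop (s.length - j)

-- k is the LONGEST proper border length of s
def LpbAt (s : List String) (k : Nat) : Prop :=
  Border s k ∧ ∀ j, Border s j → j ≤ k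

theorem border_zero (s : List String) (h : s ≠ []) : Border s 0 := by
  refine ⟨List.length_pos_of_ne_nil h, by simp⟩

-- for j a border of s and j' < j: j' is a border of s iff it is a border of the border prefix
theorem border_iff_take (s : List String) (j j' : Nat) (hj : Border s j) (hlt : j' < j) :
    Border s j' ↔ Border (s.take j) j' := by
  obtain ⟨hjn, hjeq⟩ := hj
  have hlen : (s.take j).length = j := by simp; omega
  constructor
  · intro ⟨hj'n, hj'eq⟩
    refine ⟨by omega, ?_⟩
    rw [hlen, List.take_take, Nat.min_eq_left (by omega), hjeq, List.drop_drop]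
    rw [hj'eq]
    congr 1
    omega
  · intro ⟨_, hj'eq⟩
    refine ⟨by omega, ?_⟩
    rw [hlen] at hj'eq
    rw [List.take_take, Nat.min_eq_left (by omega)] at hj'eq
    rw [hj'eq, hjeq, List.drop_drop]
    congr 1
    omega

theorem getD_take_eq (s : List String) (i j : Nat) (h : j < i) :
    (s.take i).getD j "" = s.getD j "" := by
  by_cases hj : j < s.length
  · rw [List.getD_eq_getElem _ _ (by simp; omega), List.getD_eq_getElem _ _ hj]
    simp
  · rw [List.getD_eq_default _ _ (by simp; omega), List.getD_eq_default _ _ (by omega)]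

theorem take_succ_getD (s : List String) (i : Nat) (h : i < s.length) :
    s.take (i+1) = s.take i ++ [s.getD i ""] := by
  rw [List.take_add_one, List.getElem?_eq_getElem h, List.getD_eq_getElem _ _ h]
  rfl

theorem border_succ_iff (s : List String) (c : String) (j : Nat) :
    Border (s ++ [c]) (j+1) ↔ Border s j ∧ s.getD j "" = c := by
  unfold Border
  simp only [List.length_append, List.length_singleton]
  constructor
  · intro ⟨hlt, heq⟩
    have hjn : j < s.length := by omega
    rw [List.take_append_of_le_length (by omega),
        show s.length + 1 - (j + 1) = s.length - j by omega,
        List.drop_append_of_le_length (by omega),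
        take_succ_getD s j hjn] at heq
    have hl1 : (s.take j).length = (s.drop (s.length - j)).length := by simp; omega
    obtain ⟨h1, h2⟩ := List.append_inj heq hl1
    exact ⟨⟨hjn, h1⟩, by simpa using h2⟩
  · intro ⟨⟨hjn, heq⟩, hc⟩
    refine ⟨by omega, ?_⟩
    rw [List.take_append_of_le_length (by omega),
        show s.length + 1 - (j + 1) = s.length - j by omega,
        List.drop_append_of_le_length (by omega),
        take_succ_getD s j hjn, heq, hc]

-- the while-loop (kmpShrink) finds the longest border of take i s whose next element matches x
theorem shrink_spec (s : List String) (pi : List Nat) (i : Nat) (hi : 1 ≤ i) (hin : i ≤ s.length)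
    (hpi : ∀ m, m < i → LpbAt (s.take (m+1)) (pi.getD m 0))
    (x : String) (fuel k : Nat) (hf : k ≤ fuel)
    (hkb : Border (s.take i) k)
    (hmax : ∀ j, Border (s.take i) j → s.getD j "" = x → j ≤ k) :
    Border (s.take i) (kmpShrink s pi x fuel k) ∧
    (∀ j, Border (s.take i) j → s.getD j "" = x → j ≤ kmpShrink s pi x fuel k) ∧
    (0 < kmpShrink s pi x fuel k → s.getD (kmpShrink s pi x fuel k) "" = x) := by
  induction fuel generalizing k with
  | zero =>
    have hk0 : k = 0 := by omega
    subst hk0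
    simp only [kmpShrink]
    exact ⟨hkb, hmax, by omega⟩
  | succ fuel ih =>
    simp only [kmpShrink]
    by_cases hc : 0 < k ∧ ¬ (x = s.getD k "")
    · rw [if_pos hc]
      obtain ⟨hk0, hne⟩ := hc
      have hklt : k < i := by
        have := hkb.1; simp at this; omega
      have hlpb := hpi (k-1) (by omega)
      rw [show k - 1 + 1 = k by omega] at hlpb
      set k' := pi.getD (k-1) 0 with hk'
      have htk : (s.take i).take k = s.take k := by
        rw [List.take_take, Nat.min_eq_left (by omega)]
      have hk'b : Border (s.take k) k' := hlpb.1
      have hk'lt : k' < k := by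
        have := hk'b.1; simp at this; omega
      have hk'bi : Border (s.take i) k' := by
        rw [border_iff_take (s.take i) k k' hkb hk'lt, htk]; exact hk'b
      apply ih k' (by omega) hk'bi
      intro j hj hjx
      have hjk : j ≤ k := hmax j hj hjx
      have hjne : j ≠ k := by
        intro h; subst h
        exact hne hjx.symm
      have hjb : Border (s.take k) j := by
        rw [← htk]
        exact (border_iff_take (s.take i) k j hkb (by omega)).mp hj
      exact hlpb.2 j hjb
    · rw [if_neg hc]
      refine ⟨hkb, hmax, ?_⟩
      intro hk0
      by_contra hne
      exact hc ⟨hk0, fun h => hne h.symm⟩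

-- one step of the pi-building loop preserves the longest-border invariant
theorem step_spec (s : List String) (pi : List Nat) (i : Nat) (hi : 1 ≤ i) (hin : i < s.length)
    (hpi : ∀ m, m < i → LpbAt (s.take (m+1)) (pi.getD m 0))
    (k : Nat) (hk : LpbAt (s.take i) k) :
    LpbAt (s.take (i+1))
      (if s.getD i "" = s.getD (kmpShrink s pi (s.getD i "") k k) "" then
        kmpShrink s pi (s.getD i "") k k + 1
       else kmpShrink s pi (s.getD i "") k k) := by
  set x := s.getD i "" with hx
  have hsp := shrink_spec s pi i hi (by omega) hpi x k k (le_refl k) hk.1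
    (fun j hj _ => hk.2 j hj)
  set r := kmpShrink s pi x k k with hr
  obtain ⟨hrb, hrmax, hrmatch⟩ := hsp
  have hrlt : r < i := by have := hrb.1; simp at this; omega
  have hsucc : s.take (i+1) = s.take i ++ [x] := take_succ_getD s i hin
  by_cases hm : x = s.getD r ""
  · rw [if_pos hm]
    constructor
    · rw [hsucc, border_succ_iff]
      refine ⟨hrb, ?_⟩
      rw [getD_take_eq s i r hrlt] at *
      exact hm.symm
    · intro j hj
      match j with
      | 0 => omega
      | j+1 =>
        rw [hsucc, border_succ_iff] at hj
        obtain ⟨hjb, hjx⟩ := hj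
        have hjlt : j < i := by have := hjb.1; simp at this; omega
        rw [getD_take_eq s i j hjlt] at hjx
        have := hrmax j hjb hjx
        omega
  · rw [if_neg hm]
    have hr0 : r = 0 := by
      by_contra h
      exact hm (hrmatch (by omega)).symm
    rw [hr0] at hrmax hm ⊢
    constructor
    · apply border_zero
      apply List.ne_nil_of_length_pos
      simp
      omega
    · intro j hj
      match j with
      | 0 => omega
      | j+1 =>
        rw [hsucc, border_succ_iff] at hj
        obtain ⟨hjb, hjx⟩ := hj
        have hjlt : j < i := by have := hjb.1; simp at this; omega
        rw [getD_take_eq s i j hjlt] at hjx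
        have hj0 : j = 0 := by have := hrmax j hjb hjx; omega
        rw [hj0] at hjx
        exact absurd hjx.symm hm

-- the pi-building fold: after m steps, pi has length m+1, stores the longest borders,
-- and the running k is its last entry
theorem fold_inv (s : List String) (h1 : 1 ≤ s.length) (m : Nat) (hm : m ≤ s.length - 1) :
    let st := (List.range' 1 m).foldl
      (fun (st : List Nat × Nat) i =>
        let x := s.getD i ""
        let k := kmpShrink s st.1 x st.2 st.2
        let k := if x = s.getD k "" then k + 1 else k
        (st.1 ++ [k], k))
      ([0], 0)
    st.1.length = m + 1 ∧ (∀ i, i < m + 1 → LpbAt (s.take (i+1)) (st.1.getD i 0)) ∧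
    st.2 = st.1.getD m 0 := by
  induction m with
  | zero =>
    refine ⟨rfl, ?_, rfl⟩
    intro i hi
    have hi0 : i = 0 := by omega
    subst hi0
    constructor
    · apply border_zero
      apply List.ne_nil_of_length_pos
      simp
      omega
    · intro j hj
      have := hj.1
      simp at this
      omega
  | succ m ih =>
    obtain ⟨hlen, hall, hlast⟩ := ih (by omega)
    rw [List.range'_concat, List.foldl_append]
    simp only [List.foldl_cons, List.foldl_nil]
    set st := (List.range' 1 m).foldl
      (fun (st : List Nat × Nat) i =>
        let x := s.getD i ""
        let k := kmpShrink s st.1 x st.2 st.2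
        let k := if x = s.getD k "" then k + 1 else k
        (st.1 ++ [k], k))
      ([0], 0) with hst
    rw [show 1 + 1 * m = m + 1 from by omega]
    have hnew := step_spec s st.1 (m+1) (by omega) (by omega)
      (fun j hj => hall j (by omega)) st.2 (by rw [hlast]; exact hall m (by omega))
    set k2 := (if s.getD (m+1) "" = s.getD (kmpShrink s st.1 (s.getD (m+1) "") st.2 st.2) ""
      then kmpShrink s st.1 (s.getD (m+1) "") st.2 st.2 + 1
      else kmpShrink s st.1 (s.getD (m+1) "") st.2 st.2) with hk2
    refine ⟨by simp [hlen], ?_, ?_⟩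
    · intro i hi
      by_cases hilt : i < m + 1
      · rw [List.getD_append st.1 [k2] 0 i (by omega)]
        exact hall i hilt
      · have hieq : i = m + 1 := by omega
        subst hieq
        rw [List.getD_append_right st.1 [k2] 0 (m+1) (by omega), hlen]
        simpa using hnew
    · rw [List.getD_append_right st.1 [k2] 0 (m+1) (by omega), hlen]
      simp

theorem kmpPi_spec (s : List String) (h1 : 1 ≤ s.length) :
    (kmpPi s).length = s.length ∧
    ∀ i, i < s.length → LpbAt (s.take (i+1)) ((kmpPi s).getD i 0) := by
  obtain ⟨hlen, hall, _⟩ := fold_inv s h1 (s.length - 1) (le_refl _)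
  unfold kmpPi
  exact ⟨by rw [hlen]; omega, fun i hi => hall i (by omega)⟩

-- proof-side skeleton of the failure chain
def chainL (pi : List Nat) : Nat → Nat → List Nat
  | 0, _ => []
  | fuel+1, b => if 0 < b then b :: chainL pi fuel (pi.getD (b-1) 0) else []

theorem chainWalk_eq (pi : List Nat) (n : Nat) (fuel b : Nat) (out : List String) :
    chainWalk pi n fuel b out =
      out ++ ((chainL pi fuel b).filter (fun b => decide (2 ≤ n - b ∧ n - b < n / 2))).map
        (fun b => "periodic_" ++ PySem.Int.toStr ((n - b : Nat) : Int)) := by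
  induction fuel generalizing b out with
  | zero => simp [chainWalk, chainL]
  | succ fuel ih =>
    simp only [chainWalk, chainL]
    by_cases hb : 0 < b
    · rw [if_pos hb, if_pos hb, ih]
      by_cases hp : 2 ≤ n - b ∧ n - b < n / 2
      · rw [if_pos hp, List.filter_cons_of_pos (by simpa using hp)]
        simp
      · rw [if_neg hp, List.filter_cons_of_neg (by simpa using hp)]
    · rw [if_neg hb, if_neg hb]
      simp

-- the chain from a border b enumerates exactly the positive borders ≤ b
theorem chain_mem (s : List String) (pi : List Nat)
    (hpi : ∀ m, m < s.length → LpbAt (s.take (m+1)) (pi.getD m 0)) :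
    ∀ (fuel b : Nat), b ≤ fuel → (b = 0 ∨ Border s b) →
    ∀ j, j ∈ chainL pi fuel b ↔ (0 < j ∧ j ≤ b ∧ Border s j) := by
  intro fuel
  induction fuel with
  | zero =>
    intro b hf _ j
    have : b = 0 := by omega
    subst this
    simp [chainL]
    omega
  | succ fuel ih =>
    intro b hf hb j
    simp only [chainL]
    by_cases h0 : 0 < b
    · rw [if_pos h0]
      have hbb : Border s b := by rcases hb with h | h; omega; exact h
      have hbn : b < s.length := hbb.1
      have hlpb := hpi (b-1) (by omega)
      rw [show b - 1 + 1 = b by omega] at hlpb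
      set b' := pi.getD (b-1) 0 with hb'
      have hb'k : Border (s.take b) b' := hlpb.1
      have hb'lt : b' < b := by have := hb'k.1; simp at this; omega
      have hb's : b' = 0 ∨ Border s b' := by
        by_cases h : 0 < b'
        · right
          exact (border_iff_take s b b' hbb hb'lt).mpr hb'k
        · left; omega
      rw [List.mem_cons, ih b' (by omega) hb's j]
      constructor
      · rintro (h | ⟨hj0, hjb', hjb⟩)
        · subst h; exact ⟨h0, le_refl _, hbb⟩
        · exact ⟨hj0, by omega, hjb⟩
      · rintro ⟨hj0, hjb, hjbord⟩
        by_cases hje : j = b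
        · left; exact hje
        · right
          refine ⟨hj0, ?_, hjbord⟩
          have hjlt : j < b := by omega
          have : Border (s.take b) j := (border_iff_take s b j hbb hjlt).mp hjbord
          exact hlpb.2 j this
    · rw [if_neg h0]
      simp
      omega

-- the chain is strictly decreasing
theorem chain_pairwise (s : List String) (pi : List Nat)
    (hpi : ∀ m, m < s.length → LpbAt (s.take (m+1)) (pi.getD m 0)) :
    ∀ (fuel b : Nat), b ≤ fuel → (b = 0 ∨ Border s b) →
    (chainL pi fuel b).Pairwise (fun a c => c < a) := by
  intro fuel
  induction fuel with
  | zero => intro b _ _; simp [chainL]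
  | succ fuel ih =>
    intro b hf hb
    simp only [chainL]
    by_cases h0 : 0 < b
    · rw [if_pos h0]
      have hbb : Border s b := by rcases hb with h | h; omega; exact h
      have hbn : b < s.length := hbb.1
      have hlpb := hpi (b-1) (by omega)
      rw [show b - 1 + 1 = b by omega] at hlpb
      set b' := pi.getD (b-1) 0 with hb'
      have hb'k : Border (s.take b) b' := hlpb.1
      have hb'lt : b' < b := by have := hb'k.1; simp at this; omega
      have hb's : b' = 0 ∨ Border s b' := by
        by_cases h : 0 < b'
        · exact Or.inr ((border_iff_take s b b' hbb hb'lt).mpr hb'k)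
        · exact Or.inl (by omega)
      refine List.Pairwise.cons ?_ (ih b' (by omega) hb's)
      intro c hc
      have := (chain_mem s pi hpi fuel b' (by omega) hb's c).mp hc
      omega
    · rw [if_neg h0]; exact List.Pairwise.nil

-- Bool form of Border, usable inside filters
def borderB (s : List String) (j : Nat) : Bool :=
  decide (j < s.length) && (s.take j == s.drop (s.length - j))

theorem borderB_iff (s : List String) (j : Nat) : borderB s j = true ↔ Border s j := by
  simp [borderB, Border]

theorem foldl_and_eq_all {α : Type} (l : List α) (f : α → Bool) (b : Bool) :
    l.foldl (fun ok i => ok && f i) b = (b && l.all f) := by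
  induction l generalizing b with
  | nil => simp
  | cons x xs ih => simp [ih, Bool.and_assoc]

theorem floordiv_len_two (n : Nat) :
    PySem.Int.floordiv (n : Int) 2 = ((n / 2 : Nat) : Int) := by
  exact_mod_cast PySem.Int.floordiv_natCast n 2

-- the shifted-prefix equality iff A's index-modulo condition
theorem per_core {α : Type} (s : List α) (d : α) (k : Nat) (hk : 0 < k) (hkn : k ≤ s.length) :
    s.drop k = s.take (s.length - k) ↔
      ∀ j : Nat, k ≤ j → j < s.length → s.getD j d = s.getD (j % k) d := by
  have hsub : s.drop k = s.take (s.length - k) ↔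
      ∀ j : Nat, k ≤ j → j < s.length → s.getD j d = s.getD (j - k) d := by
    constructor
    · intro h j hkj hjn
      have h1 : j - k < (List.drop k s).length := by simp only [List.length_drop]; omega
      have := List.getElem_of_eq h h1
      rw [List.getElem_drop, List.getElem_take] at this
      have hidx : k + (j - k) = j := by omega
      simp only [hidx] at this
      rw [List.getD_eq_getElem s d hjn, List.getD_eq_getElem s d (by omega)]
      exact this
    · intro h
      apply List.ext_getElem (by simp only [List.length_drop, List.length_take]; omega)
      intro i h1 h2
      have hi : i < s.length - k := by simpa only [List.length_drop] using h1
      rw [List.getElem_drop, List.getElem_take,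
          ← List.getD_eq_getElem s d (show k + i < s.length by omega),
          ← List.getD_eq_getElem s d (show i < s.length by omega)]
      have := h (k + i) (by omega) (by omega)
      have hidx : (k + i) - k = i := by omega
      rwa [hidx] at this
  rw [hsub]
  constructor
  · intro h j
    induction j using Nat.strong_induction_on with
    | _ j ih =>
      intro hkj hjn
      rw [Nat.mod_eq_sub_mod hkj]
      rcases Nat.lt_or_ge (j - k) k with hc | hc
      · rw [Nat.mod_eq_of_lt hc]; exact h j hkj hjn
      · rw [h j hkj hjn, ih (j - k) (by omega) hc (by omega)]
  · intro h j hkj hjn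
    rw [h j hkj hjn, Nat.mod_eq_sub_mod hkj]
    rcases Nat.lt_or_ge (j - k) k with hc | hc
    · rw [Nat.mod_eq_of_lt hc]
    · rw [h (j - k) hc (by omega), Nat.mod_eq_sub_mod hc]

-- A's modulo inner loop (as a && fold) decides whether n-k is a border, i.e. k is a period
theorem per_bool (s : List String) (k : Nat) (hk : 0 < k) (hkn : k ≤ s.length) :
    ((PySem.List.pyRange (k : Int) (s.length : Int) 1).foldl
      (fun ok i => ok && (PySem.List.pyGetD s i "" ==
                          PySem.List.pyGetD s (PySem.Int.mod i (k : Int)) "")) true)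
    = borderB s (s.length - k) := by
  rw [foldl_and_eq_all, Bool.true_and]
  unfold borderB
  rw [show (decide (s.length - k < s.length)) = true from by simp; omega, Bool.true_and,
      show s.length - (s.length - k) = k from by omega]
  rw [Bool.eq_iff_iff, List.all_eq_true, beq_iff_eq,
      show (s.take (s.length - k) = s.drop k) ↔ (s.drop k = s.take (s.length - k)) from eq_comm,
      per_core s "" k hk hkn]
  constructor
  · intro h j hkj hjn
    have := h (j : Int) (by
      rw [PySem.List.mem_pyRange_one]
      exact ⟨by exact_mod_cast hkj, by exact_mod_cast hjn⟩)
    simpa only [PySem.Int.mod_natCast, PySem.List.pyGetD_natCast, beq_iff_eq] using this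
  · intro h i hi
    rw [PySem.List.mem_pyRange_one] at hi
    obtain ⟨h0, hlt⟩ := hi
    lift i to ℕ using (by omega : (0:Int) ≤ i) with j
    simp only [PySem.Int.mod_natCast, PySem.List.pyGetD_natCast, beq_iff_eq]
    exact h j (by exact_mod_cast h0) (by exact_mod_cast hlt)

-- the central list identity: A's filtered period range = B's filtered failure chain
theorem periods_eq (s : List String) (pi : List Nat) (h5 : 5 ≤ s.length)
    (hpi : ∀ m, m < s.length → LpbAt (s.take (m+1)) (pi.getD m 0))
    (b0 : Nat) (hlpb : LpbAt s b0) :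
    ((PySem.List.pyRange 2 ((s.length / 2 : Nat) : Int) 1).filter
        (fun x => borderB s (s.length - x.toNat))).map
      (fun x => "periodic_" ++ PySem.Int.toStr x)
    = ((chainL pi s.length b0).filter
        (fun b => decide (2 ≤ s.length - b ∧ s.length - b < s.length / 2))).map
      (fun b => "periodic_" ++ PySem.Int.toStr ((s.length - b : Nat) : Int)) := by
  have hb0n : b0 < s.length := hlpb.1.1
  have hb0s : b0 = 0 ∨ Border s b0 := Or.inr hlpb.1
  have hh2 : 2 ≤ s.length / 2 := by omega
  rw [PySem.List.pyRange_one,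
      show ((s.length / 2 : Nat) : Int) - 2 = ((s.length / 2 - 2 : Nat) : Int) from by omega,
      Int.toNat_natCast, List.filter_map, List.map_map]
  have hf1 : ∀ j : Nat, ((2 : Int) + (j : Int)).toNat = 2 + j := fun j => by omega
  have hf2 : ∀ j : Nat, (2 : Int) + (j : Int) = ((2 + j : Nat) : Int) := fun j => by omega
  simp only [Function.comp_def, hf2]
  rw [show (fun j : Nat => "periodic_" ++ PySem.Int.toStr ((2 + j : Nat) : Int))
        = (fun k : Nat => "periodic_" ++ PySem.Int.toStr ((k : Nat) : Int)) ∘ (fun j => 2 + j)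
      from rfl,
      show (fun b : Nat => "periodic_" ++ PySem.Int.toStr ((s.length - b : Nat) : Int))
        = (fun k : Nat => "periodic_" ++ PySem.Int.toStr ((k : Nat) : Int)) ∘ (fun b => s.length - b)
      from rfl,
      ← List.map_map, ← List.map_map]
  congr 1
  -- the two Nat lists of reported periods: both strictly increasing with the same members
  set KA := (((List.range (s.length / 2 - 2)).filter
    (fun j => borderB s (s.length - (2 + j)))).map (fun j => 2 + j)) with hKA
  set KB := (((chainL pi s.length b0).filter
    (fun b => decide (2 ≤ s.length - b ∧ s.length - b < s.length / 2))).map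
      (fun b => s.length - b)) with hKB
  have hmemchain := chain_mem s pi hpi s.length b0 (by omega) hb0s
  have hpA : KA.Pairwise (· < ·) := by
    rw [hKA, List.pairwise_map]
    exact (List.pairwise_lt_range.filter _).imp (by omega)
  have hpB : KB.Pairwise (· < ·) := by
    rw [hKB, List.pairwise_map]
    refine List.Pairwise.imp_of_mem ?_ ((chain_pairwise s pi hpi s.length b0 (by omega) hb0s).filter _)
    intro a b ha _ hab
    have haC : a ∈ chainL pi s.length b0 := (List.mem_filter.mp ha).1
    have := (hmemchain a).mp haC
    have : a < s.length := this.2.2.1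
    omega
  have hmem : ∀ k, k ∈ KA ↔ k ∈ KB := by
    intro k
    rw [hKA, hKB]
    simp only [List.mem_map, List.mem_filter, List.mem_range, decide_eq_true_eq]
    constructor
    · rintro ⟨j, ⟨hj, hbj⟩, rfl⟩
      have hbord : Border s (s.length - (2 + j)) := (borderB_iff _ _).mp hbj
      refine ⟨s.length - (2 + j), ⟨?_, ?_⟩, ?_⟩
      · rw [hmemchain]
        refine ⟨by omega, hlpb.2 _ hbord, hbord⟩
      · omega
      · omega
    · rintro ⟨b, ⟨hbc, hrange⟩, rfl⟩
      have hb := (hmemchain b).mp hbc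
      obtain ⟨hb0', hble, hbord⟩ := hb
      have hbn : b < s.length := hbord.1
      refine ⟨s.length - b - 2, ⟨by omega, ?_⟩, by omega⟩
      rw [borderB_iff, show s.length - (2 + (s.length - b - 2)) = b from by omega]
      exact hbord
  exact List.Perm.eq_of_pairwise (fun a b _ _ h1 h2 => by omega) hpA hpB
    ((List.perm_ext_iff_of_nodup hpA.nodup hpB.nodup).mpr hmem)

-- ===== VERDICT (by name: the statement is the Claim_ definition above) =====
theorem detect_temporal_symmetries_py_spec : Claim_equal_detect_temporal_symmetries_py := by
  unfold Claim_equal_detect_temporal_symmetries_py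
  intro proteins _
  unfold Spec_detect_temporal_symmetries_py
  by_cases h5 : proteins.length ≥ 5
  · have h5' : ¬ proteins.length < 5 := by omega
    simp only [detect_temporal_symmetries_py, detect_temporal_symmetries_py_alt,
      if_pos h5, if_neg h5', List.nil_append]
    set s := proteins.map (fun p => (PySem.Dict.mk p).getD "sequence" "") with hs
    have hlen : proteins.length = s.length := by rw [hs, List.length_map]
    rw [hlen]
    have hslen : 5 ≤ s.length := by omega
    obtain ⟨hplen, hpall⟩ := kmpPi_spec s (by omega)
    have hlpb : LpbAt s ((kmpPi s).getD (s.length - 1) 0) := by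
      have := hpall (s.length - 1) (by omega)
      rwa [show s.length - 1 + 1 = s.length from by omega, List.take_length] at this
    rw [chainWalk_eq, floordiv_len_two]
    refine Eq.trans (PySem.List.foldl_congr_mem _ _
      (fun acc (period : Int) =>
        if borderB s (s.length - period.toNat) then
          acc ++ ["periodic_" ++ PySem.Int.toStr period] else acc)
      _ ?_) ?_
    · intro acc x hx
      rw [PySem.List.mem_pyRange_one] at hx
      obtain ⟨h2x, hxlt⟩ := hx
      lift x to ℕ using (by omega : (0:Int) ≤ x) with k
      have hk2 : 2 ≤ k := by exact_mod_cast h2x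
      have hklt : k < s.length / 2 := by exact_mod_cast hxlt
      rw [Int.toNat_natCast, per_bool s k (by omega) (by omega)]
    · rw [PySem.List.foldl_append_if]
      congr 1
      exact periods_eq s (kmpPi s) hslen hpall _ hlpb
  · simp [detect_temporal_symmetries_py, detect_temporal_symmetries_py_alt, h5,
      show proteins.length < 5 by omega]
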